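-- pv_equiv track=rewrite | github.com/craigsimm/pixel-fix | src/pixel_fix/gui/processing.py | _preserves_local_connectivity
-- ===== SOURCE A (Python) =====
-- def _preserves_local_connectivity(mask: list[list[bool]], x: int, y: int) -> bool:
--     height = len(mask)
--     width = len(mask[0]) if height else 0
--     neighbors: list[tuple[int, int]] = []
--     for neighbor_y in range(max(0, y - 1), min(height, y + 2)):
--         for neighbor_x in range(max(0, x - 1), min(width, x + 2)):
--             if neighbor_x == x and neighbor_y == y:
--                 continue
--             if mask[neighbor_y][neighbor_x]:
--                 neighbors.append((neighbor_x, neighbor_y))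
--     if len(neighbors) <= 1:
--         return True
--     allowed = set(neighbors)
--     pending = [neighbors[0]]
--     visited: set[tuple[int, int]] = set()
--     while pending:
--         point = pending.pop()
--         if point in visited:
--             continue
--         visited.add(point)
--         px, py = point
--         for neighbor_y in range(max(0, py - 1), min(height, py + 2)):
--             for neighbor_x in range(max(0, px - 1), min(width, px + 2)):
--                 neighbor = (neighbor_x, neighbor_y)
--                 if neighbor in allowed and neighbor not in visited:
--                     pending.append(neighbor)
--     return len(visited) == len(allowed)
-- ===== SOURCE B (Python) =====
-- def _preserves_local_connectivity(mask: list[list[bool]], x: int, y: int) -> bool: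
--     height = len(mask)
--     width = len(mask[0]) if height else 0
--     neighbors = [
--         (neighbor_x, neighbor_y)
--         for neighbor_y in range(max(0, y - 1), min(height, y + 2))
--         for neighbor_x in range(max(0, x - 1), min(width, x + 2))
--         if not (neighbor_x == x and neighbor_y == y) and mask[neighbor_y][neighbor_x]
--     ]
--     if len(neighbors) <= 1:
--         return True
--     targets = set(neighbors)
--     component = {neighbors[0]}
--     for _ in range(len(neighbors)):
--         component = component | {
--             p for p in neighbors
--             if any(abs(p[0] - q[0]) <= 1 and abs(p[1] - q[1]) <= 1 for q in component)
--         }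
--     return len(component) == len(targets)
-- ===== Notes on version B (the rewrite author's own statement) =====
-- stated objective: alternative
-- what changed: A's stack-based flood fill over clamped grid-window scans is replaced by a bounded fixpoint iteration (round-based set closure) over Chebyshev adjacency of the gathered neighbor list, with the neighbor gathering rewritten as a comprehension.
import Mathlib
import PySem

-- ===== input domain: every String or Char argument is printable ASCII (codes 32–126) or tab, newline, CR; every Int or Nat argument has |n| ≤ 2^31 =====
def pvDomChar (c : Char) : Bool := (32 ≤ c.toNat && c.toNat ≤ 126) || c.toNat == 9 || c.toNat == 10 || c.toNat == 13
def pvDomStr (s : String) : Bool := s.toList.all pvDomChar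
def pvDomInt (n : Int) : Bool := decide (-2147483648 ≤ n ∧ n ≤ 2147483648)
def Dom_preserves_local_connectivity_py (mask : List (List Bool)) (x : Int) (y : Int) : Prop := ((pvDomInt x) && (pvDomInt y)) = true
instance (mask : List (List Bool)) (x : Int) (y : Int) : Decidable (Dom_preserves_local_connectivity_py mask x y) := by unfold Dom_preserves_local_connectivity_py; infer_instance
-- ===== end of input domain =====

-- B replaces A's stack-based flood fill over window scans by a bounded fixpoint iteration (round-based
-- closure) over Chebyshev adjacency of the gathered neighbor list; objective: alternative (same cost).

-- ===== PORT A =====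
-- mask[ny][nx]; inside Pre_ both indices are always in range, so the `getD` defaults never fire
def pvCell (mask : List (List Bool)) (ny nx : Int) : Bool :=
  (PySem.List.pyGet? ((PySem.List.pyGet? mask ny).getD []) nx).getD false

-- A's while-loop flood fill; stack top at the head (Python appends/pops at the end of `pending`).
-- `fuel` only totalizes the while loop: it decreases exactly when a new point is visited, and the
-- caller's allowed.length + 1 is proved sufficient below (pvFlood never hits the fuel = 0 case).
def pvFlood (height width : Int) (allowed : List (Int × Int)) :
    Nat → List (Int × Int) → PySem.Set (Int × Int) → PySem.Set (Int × Int)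
  | _, [], visited => visited
  | 0, _ :: _, visited => visited
  | Nat.succ fuel, point :: rest, visited =>
    if point ∈ visited then pvFlood height width allowed (Nat.succ fuel) rest visited
    else
      let visited' := PySem.Set.add visited point
      let pending' :=
        (PySem.List.pyRange (max 0 (point.2 - 1)) (min height (point.2 + 2)) 1).foldl
          (fun st ny =>
            (PySem.List.pyRange (max 0 (point.1 - 1)) (min width (point.1 + 2)) 1).foldl
              (fun st nx =>
                if (nx, ny) ∈ allowed ∧ (nx, ny) ∉ visited' then (nx, ny) :: st else st)
              st)
          rest
      pvFlood height width allowed fuel pending' visited'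
  termination_by fuel pending _ => (fuel, pending.length)

def preserves_local_connectivity_py (mask : List (List Bool)) (x : Int) (y : Int) : Bool :=
  let height : Int := (mask.length : Int)
  let width : Int := if mask.length = 0 then 0 else ((mask.headD []).length : Int)
  let neighbors : List (Int × Int) :=
    (PySem.List.pyRange (max 0 (y - 1)) (min height (y + 2)) 1).foldl
      (fun acc ny =>
        (PySem.List.pyRange (max 0 (x - 1)) (min width (x + 2)) 1).foldl
          (fun acc nx =>
            if nx = x ∧ ny = y then acc
            else if pvCell mask ny nx then acc ++ [(nx, ny)] else acc)
          acc)
      []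
  if neighbors.length ≤ 1 then true
  else
    let allowed : PySem.Set (Int × Int) := PySem.Set.ofList neighbors
    let visited :=
      pvFlood height width allowed (allowed.length + 1) [neighbors.headD (0, 0)] PySem.Set.empty
    decide (visited.length = allowed.length)

-- ===== PORT B =====
-- abs(px - qx) <= 1 and abs(py - qy) <= 1
def pvAdjB (p q : Int × Int) : Bool := decide (|p.1 - q.1| ≤ 1 ∧ |p.2 - q.2| ≤ 1)

-- component | {p for p in neighbors if any(adj(p, q) for q in component)}
def pvStep (neighbors : List (Int × Int)) (comp : PySem.Set (Int × Int)) : PySem.Set (Int × Int) :=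
  PySem.Set.union comp (neighbors.filter (fun p => comp.any (fun q => pvAdjB p q)))

def preserves_local_connectivity_py_alt (mask : List (List Bool)) (x : Int) (y : Int) : Bool :=
  let height : Int := (mask.length : Int)
  let width : Int := if mask.length = 0 then 0 else ((mask.headD []).length : Int)
  let neighbors : List (Int × Int) :=
    (PySem.List.pyRange (max 0 (y - 1)) (min height (y + 2)) 1).flatMap
      (fun ny =>
        ((PySem.List.pyRange (max 0 (x - 1)) (min width (x + 2)) 1).filter
            (fun nx => !(nx == x && ny == y) && pvCell mask ny nx)).map
          (fun nx => (nx, ny)))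
  if neighbors.length ≤ 1 then true
  else
    let targets : PySem.Set (Int × Int) := PySem.Set.ofList neighbors
    let comp :=
      (List.range neighbors.length).foldl (fun c _ => pvStep neighbors c)
        (PySem.Set.ofList [neighbors.headD (0, 0)])
    decide (comp.length = targets.length)

-- ===== PRECONDITION & SPEC =====
-- Pre_ excludes exactly the ragged masks on which A's neighbor scan indexes past the end of a row
-- shorter than len(mask[0]) and Python raises IndexError; on every other input A returns normally.
def Pre_preserves_local_connectivity_py (mask : List (List Bool)) (x : Int) (y : Int) : Prop :=
  ∀ ny ∈ PySem.List.pyRange (max 0 (y - 1)) (min (mask.length : Int) (y + 2)) 1,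
    ∀ nx ∈ PySem.List.pyRange (max 0 (x - 1))
        (min (if mask.length = 0 then 0 else ((mask.headD []).length : Int)) (x + 2)) 1,
      ¬(nx = x ∧ ny = y) → nx < (((PySem.List.pyGet? mask ny).getD []).length : Int)
instance (mask : List (List Bool)) (x : Int) (y : Int) :
    Decidable (Pre_preserves_local_connectivity_py mask x y) := by
  unfold Pre_preserves_local_connectivity_py; infer_instance

def pvWitness_preserves_local_connectivity_py : List (List Bool) × Int × Int :=
  ([[true, true], [true, false]], 0, 0)

def Spec_preserves_local_connectivity_py (mask : List (List Bool)) (x : Int) (y : Int) (out : Bool) : Prop :=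
  out = preserves_local_connectivity_py_alt mask x y
instance (mask : List (List Bool)) (x : Int) (y : Int) (out : Bool) :
    Decidable (Spec_preserves_local_connectivity_py mask x y out) := by
  unfold Spec_preserves_local_connectivity_py; infer_instance

-- ===== CLAIM (what is proved, stated in full; the proofs are below) =====
def Claim_equal_preserves_local_connectivity_py : Prop :=
  ∀ (mask : List (List Bool)) (x : Int) (y : Int),
    Dom_preserves_local_connectivity_py mask x y →
    Pre_preserves_local_connectivity_py mask x y →
    Spec_preserves_local_connectivity_py mask x y (preserves_local_connectivity_py mask x y)

-- ===== LEMMAS AND PROOFS =====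

-- reachability inside `allowed` by Chebyshev-distance-1 steps
def pvReach (allowed : List (Int × Int)) (p q : Int × Int) : Prop :=
  Relation.ReflTransGen (fun a b => b ∈ allowed ∧ pvAdjB a b = true) p q

theorem pvAdjB_symm (p q : Int × Int) : pvAdjB p q = pvAdjB q p := by
  simp [pvAdjB, abs_sub_comm]

theorem mem_foldl_cons_ite {α β : Type} [DecidableEq β] (P : α → Prop) [DecidablePred P]
    (f : α → β) (q : β) :
    ∀ (l : List α) (st0 : List β),
      (q ∈ l.foldl (fun st x => if P x then f x :: st else st) st0 ↔
        q ∈ st0 ∨ ∃ x ∈ l, P x ∧ q = f x) := by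
  intro l
  induction l with
  | nil => simp
  | cons a t ih =>
    intro st0
    by_cases h : P a <;> simp [h, ih] <;> tauto

theorem length_filter_lt_of_strict {α : Type} (P Q : α → Bool) :
    ∀ (l : List α), (∀ x ∈ l, P x = true → Q x = true) →
      ∀ x ∈ l, Q x = true → P x = false →
        (l.filter P).length < (l.filter Q).length := by
  intro l
  induction l with
  | nil => simp
  | cons a t ih =>
    intro himp x hx hQ hP
    have hmono := List.countP_mono_left (p := P) (q := Q) (l := t)
      (fun b hb h => himp b (by simp [hb]) h)
    rcases List.mem_cons.1 hx with rfl | hx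
    · simp only [List.filter_cons, hP, hQ, if_true, Bool.false_eq_true, if_false,
        List.length_cons, ← List.countP_eq_length_filter]
      omega
    · have h2 := ih (fun b hb h => himp b (by simp [hb]) h) x hx hQ hP
      simp only [← List.countP_eq_length_filter] at h2 ⊢
      by_cases ha : P a = true
      · have hqa : Q a = true := himp a (by simp) ha
        simp [ha, hqa]; omega
      · have ha' : P a = false := by simpa using ha
        by_cases hqa : Q a = true <;> simp [ha', hqa] <;> omega

-- gather lists of the two ports coincide
theorem pvGather_eq (mask : List (List Bool)) (x y : Int) (ry rx : List Int) :
    ry.foldl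
      (fun acc ny =>
        rx.foldl
          (fun acc nx =>
            if nx = x ∧ ny = y then acc
            else if pvCell mask ny nx then acc ++ [(nx, ny)] else acc)
          acc)
      [] =
    ry.flatMap
      (fun ny =>
        (rx.filter (fun nx => !(nx == x && ny == y) && pvCell mask ny nx)).map
          (fun nx => (nx, ny))) := by
  have hinner : ∀ (ny : Int) (acc : List (Int × Int)),
      rx.foldl
        (fun acc nx =>
          if nx = x ∧ ny = y then acc
          else if pvCell mask ny nx then acc ++ [(nx, ny)] else acc)
        acc =
      acc ++ (rx.filter (fun nx => !(nx == x && ny == y) && pvCell mask ny nx)).map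
        (fun nx => (nx, ny)) := by
    intro ny acc
    have h1 : rx.foldl
        (fun acc nx =>
          if nx = x ∧ ny = y then acc
          else if pvCell mask ny nx then acc ++ [(nx, ny)] else acc)
        acc =
      rx.foldl
        (fun acc nx =>
          if (¬(nx = x ∧ ny = y)) ∧ pvCell mask ny nx = true then acc ++ [(nx, ny)] else acc)
        acc := by
      apply PySem.List.foldl_congr_mem
      intro acc nx _
      by_cases h : nx = x ∧ ny = y <;> by_cases hc : pvCell mask ny nx = true <;>
        simp [h, hc]
    rw [h1, PySem.List.foldl_append_ite]
    congr 1
    congr 1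
    apply List.filter_congr
    intro nx _
    by_cases h1 : nx = x <;> by_cases h2 : ny = y <;> simp [h1, h2]
  have houter := PySem.List.foldl_congr_mem (l := ry) (init := ([] : List (Int × Int)))
    (f := fun acc ny =>
      rx.foldl
        (fun acc nx =>
          if nx = x ∧ ny = y then acc
          else if pvCell mask ny nx then acc ++ [(nx, ny)] else acc)
        acc)
    (g := fun acc ny => acc ++
      (rx.filter (fun nx => !(nx == x && ny == y) && pvCell mask ny nx)).map
        (fun nx => (nx, ny)))
    (fun acc ny _ => hinner ny acc)
  rw [houter, PySem.List.foldl_append_eq_flatMap]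
  simp

theorem pvGather_mem (mask : List (List Bool)) (x y a b : Int) (q : Int × Int)
    (h : q ∈ (PySem.List.pyRange (max 0 (y - 1)) (min b (y + 2)) 1).flatMap
      (fun ny =>
        ((PySem.List.pyRange (max 0 (x - 1)) (min a (x + 2)) 1).filter
            (fun nx => !(nx == x && ny == y) && pvCell mask ny nx)).map
          (fun nx => (nx, ny)))) :
    0 ≤ q.1 ∧ q.1 < a ∧ 0 ≤ q.2 ∧ q.2 < b := by
  simp only [List.mem_flatMap, List.mem_map, List.mem_filter,
    PySem.List.mem_pyRange_one] at h
  obtain ⟨ny, hny, nx, ⟨hnx, -⟩, rfl⟩ := h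
  exact ⟨by omega, by omega, by omega, by omega⟩

theorem mem_foldl_of_step {α β : Type} (g : List α → β → List α) (C : β → Prop) (q : α)
    (hg : ∀ st ny, q ∈ g st ny ↔ q ∈ st ∨ C ny) :
    ∀ (l : List β) (st : List α), q ∈ l.foldl g st ↔ q ∈ st ∨ ∃ ny ∈ l, C ny := by
  intro l
  induction l with
  | nil => simp
  | cons a t ih =>
    intro st
    simp [ih, hg]
    tauto

-- membership in the pushed stack

theorem pvPush_mem (height width : Int) (allowed : List (Int × Int)) (point : Int × Int)
    (visited' : List (Int × Int)) (rest : List (Int × Int)) (q : Int × Int) :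
    q ∈ (PySem.List.pyRange (max 0 (point.2 - 1)) (min height (point.2 + 2)) 1).foldl
          (fun st ny =>
            (PySem.List.pyRange (max 0 (point.1 - 1)) (min width (point.1 + 2)) 1).foldl
              (fun st nx =>
                if (nx, ny) ∈ allowed ∧ (nx, ny) ∉ visited' then (nx, ny) :: st else st)
              st)
          rest ↔
      q ∈ rest ∨ (q ∈ allowed ∧ q ∉ visited' ∧
        max 0 (point.1 - 1) ≤ q.1 ∧ q.1 < min width (point.1 + 2) ∧
        max 0 (point.2 - 1) ≤ q.2 ∧ q.2 < min height (point.2 + 2)) := by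
  rw [mem_foldl_of_step _
    (fun ny => ∃ nx ∈ PySem.List.pyRange (max 0 (point.1 - 1)) (min width (point.1 + 2)) 1,
      ((nx, ny) ∈ allowed ∧ (nx, ny) ∉ visited') ∧ q = (nx, ny)) q
    (fun st ny => mem_foldl_cons_ite
      (fun nx => (nx, ny) ∈ allowed ∧ (nx, ny) ∉ visited') (fun nx => (nx, ny)) q _ st)]
  constructor
  · rintro (h | ⟨ny, hny, nx, hnx, ⟨hP, hnv⟩, rfl⟩)
    · exact Or.inl h
    · simp only [PySem.List.mem_pyRange_one] at hny hnx
      exact Or.inr ⟨hP, hnv, by omega, by omega, by omega, by omega⟩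
  · rintro (h | ⟨hP, hnv, h1, h2, h3, h4⟩)
    · exact Or.inl h
    · refine Or.inr ⟨q.2, ?_, q.1, ?_, ⟨by simpa using hP, by simpa using hnv⟩, by simp⟩ <;>
        simp only [PySem.List.mem_pyRange_one] <;> omega

theorem pvFlood_correct (height width : Int) (allowed : List (Int × Int))
    (hA : allowed.Nodup)
    (hB : ∀ q ∈ allowed, 0 ≤ q.1 ∧ q.1 < width ∧ 0 ≤ q.2 ∧ q.2 < height)
    (p0 : Int × Int) :
    ∀ (fuel : Nat) (pending : List (Int × Int)) (visited : PySem.Set (Int × Int)),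
      visited.Nodup →
      (∀ v ∈ visited, v ∈ allowed ∧ pvReach allowed p0 v) →
      (∀ p ∈ pending, p ∈ allowed ∧ pvReach allowed p0 p) →
      (∀ v ∈ visited, ∀ q ∈ allowed, pvAdjB v q = true → q ∈ visited ∨ q ∈ pending) →
      (p0 ∈ visited ∨ p0 ∈ pending) →
      (pending ≠ [] → (allowed.filter (fun q => decide (q ∉ visited))).length + 1 ≤ fuel) →
      (∀ q, q ∈ pvFlood height width allowed fuel pending visited ↔
          q ∈ allowed ∧ pvReach allowed p0 q) ∧
        (pvFlood height width allowed fuel pending visited).Nodup := by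
  intro fuel pending visited
  induction fuel, pending, visited using pvFlood.induct (height := height) (width := width) (allowed := allowed) with
  | case1 fuel visited =>
    intro hnd h2 h3 h4 h5 h6
    rw [pvFlood]
    have aux : ∀ q : Int × Int, pvReach allowed p0 q → q ∈ visited := by
      intro q hr
      induction hr with
      | refl => exact h5.resolve_right (by simp)
      | tail hab hbc ih2 =>
        exact (h4 _ ih2 _ hbc.1 hbc.2).resolve_right (by simp)
    exact ⟨fun q => ⟨fun hq => h2 q hq, fun hx => aux q hx.2⟩, hnd⟩
  | case2 p rest visited =>
    intro hnd h2 h3 h4 h5 h6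
    exact absurd (h6 (by simp)) (by omega)
  | case3 fuel point rest visited hmem ih =>
    intro hnd h2 h3 h4 h5 h6
    rw [pvFlood, if_pos hmem]
    apply ih hnd h2 (fun p hp => h3 p (List.mem_cons_of_mem _ hp))
    · intro v hv q hq hadj
      rcases h4 v hv q hq hadj with h | h
      · exact Or.inl h
      · rcases List.mem_cons.1 h with rfl | h
        · exact Or.inl hmem
        · exact Or.inr h
    · rcases h5 with h | h
      · exact Or.inl h
      · rcases List.mem_cons.1 h with rfl | h
        · exact Or.inl hmem
        · exact Or.inr h
    · intro _
      exact h6 (by simp)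
  | case4 fuel point rest visited hmem vlet plet ih =>
    intro hnd h2 h3 h4 h5 h6
    rw [pvFlood, if_neg hmem]
    have hpa : point ∈ allowed := (h3 point (List.mem_cons_self)).1
    have hpr : pvReach allowed p0 point := (h3 point (List.mem_cons_self)).2
    have hmemv' : ∀ q, q ∈ PySem.Set.add visited point ↔ q ∈ visited ∨ q = point :=
      fun q => PySem.Set.mem_add visited point q
    apply ih
    · exact PySem.Set.nodup_add visited point hnd
    · intro v hv
      rcases (hmemv' v).1 hv with h | rfl
      · exact h2 v h
      · exact ⟨hpa, hpr⟩
    · intro p hp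
      rcases (pvPush_mem height width allowed point _ rest p).1 hp with h | ⟨hpal, hpnv, hw⟩
      · exact h3 p (List.mem_cons_of_mem _ h)
      · refine ⟨hpal, hpr.tail ⟨hpal, ?_⟩⟩
        simp only [pvAdjB, decide_eq_true_eq, abs_le]
        omega
    · intro v hv q hq hadj
      rcases (hmemv' v).1 hv with h | hpt
      · rcases h4 v h q hq hadj with h' | h'
        · exact Or.inl ((hmemv' q).2 (Or.inl h'))
        · rcases List.mem_cons.1 h' with rfl | h''
          · exact Or.inl ((hmemv' q).2 (Or.inr rfl))
          · exact Or.inr ((pvPush_mem height width allowed point _ rest q).2 (Or.inl h''))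
      · subst hpt
        by_cases hqv : q ∈ PySem.Set.add visited v
        · exact Or.inl hqv
        · refine Or.inr ((pvPush_mem height width allowed v _ rest q).2 (Or.inr ⟨hq, hqv, ?_⟩))
          have hb := hB q hq
          simp only [pvAdjB, decide_eq_true_eq, abs_le] at hadj
          omega
    · rcases h5 with h | h
      · exact Or.inl ((hmemv' p0).2 (Or.inl h))
      · rcases List.mem_cons.1 h with rfl | h
        · exact Or.inl ((hmemv' p0).2 (Or.inr rfl))
        · exact Or.inr ((pvPush_mem height width allowed point _ rest p0).2 (Or.inl h))
    · intro _
      show (allowed.filter (fun q => decide (q ∉ PySem.Set.add visited point))).length + 1 ≤ fuel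
      have hold := h6 (by simp)
      have hstrict := length_filter_lt_of_strict
        (fun q => decide (q ∉ PySem.Set.add visited point))
        (fun q => decide (q ∉ visited)) allowed
        (fun x _ hx => by
          simp only [decide_eq_true_eq] at hx ⊢
          exact fun hxv => hx ((hmemv' x).2 (Or.inl hxv)))
        point hpa (by simpa using hmem)
        (by simp [(hmemv' point).2 (Or.inr rfl)])
      omega

theorem pvStep_mem (nb : List (Int × Int)) (c : PySem.Set (Int × Int)) (q : Int × Int) :
    q ∈ pvStep nb c ↔ q ∈ c ∨ (q ∈ nb ∧ ∃ r ∈ c, pvAdjB q r = true) := by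
  simp [pvStep, PySem.Set.mem_union, List.mem_filter, List.any_eq_true]

theorem pvComp_nodup (nb : List (Int × Int)) (p0 : Int × Int) (k : Nat) :
    ((pvStep nb)^[k] (PySem.Set.ofList [p0])).Nodup := by
  induction k with
  | zero => simpa using PySem.Set.nodup_ofList [p0]
  | succ m ih =>
    rw [Function.iterate_succ_apply']
    exact PySem.Set.nodup_union _ _ ih

theorem pvComp_mono (nb : List (Int × Int)) (p0 : Int × Int) :
    ∀ j k : Nat, j ≤ k → ∀ q, q ∈ (pvStep nb)^[j] (PySem.Set.ofList [p0]) →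
      q ∈ (pvStep nb)^[k] (PySem.Set.ofList [p0]) := by
  intro j k hjk q hq
  induction k with
  | zero => simpa [Nat.le_zero.1 hjk] using hq
  | succ m ih =>
    rcases Nat.lt_or_ge j (m+1) with h | h
    · rw [Function.iterate_succ_apply']
      exact (pvStep_mem _ _ _).2 (Or.inl (ih (by omega)))
    · have : j = m + 1 := by omega
      subst this; exact hq

theorem pvComp_sound (nb : List (Int × Int)) (p0 : Int × Int) (hp0 : p0 ∈ nb) (k : Nat) :
    ∀ q ∈ (pvStep nb)^[k] (PySem.Set.ofList [p0]),
      q ∈ PySem.Set.ofList nb ∧ pvReach (PySem.Set.ofList nb) p0 q := by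
  induction k with
  | zero =>
    intro q hq
    simp only [Function.iterate_zero, id] at hq
    have : q = p0 := by simpa using (PySem.Set.mem_ofList [p0] q).1 hq
    subst this
    exact ⟨(PySem.Set.mem_ofList nb q).2 hp0, Relation.ReflTransGen.refl⟩
  | succ m ih =>
    intro q hq
    rw [Function.iterate_succ_apply'] at hq
    rcases (pvStep_mem _ _ _).1 hq with h | ⟨hqnb, r, hr, hadj⟩
    · exact ih q h
    · have hrr := ih r hr
      have hqa : q ∈ PySem.Set.ofList nb := (PySem.Set.mem_ofList nb q).2 hqnb
      exact ⟨hqa, hrr.2.tail ⟨hqa, by rw [pvAdjB_symm]; exact hadj⟩⟩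

theorem pvComp_correct (nb : List (Int × Int)) (p0 : Int × Int) (hp0 : p0 ∈ nb) :
    (∀ q, q ∈ (pvStep nb)^[nb.length] (PySem.Set.ofList [p0]) ↔
        q ∈ PySem.Set.ofList nb ∧ pvReach (PySem.Set.ofList nb) p0 q) ∧
      ((pvStep nb)^[nb.length] (PySem.Set.ofList [p0])).Nodup := by
  have hn0 : nb.length ≠ 0 := by
    intro h; rw [List.length_eq_zero_iff] at h; subst h; simp at hp0
  -- a fixpoint is reached at some k < nb.length
  have hfix : ∃ k < nb.length, ∀ x, x ∈ (pvStep nb)^[k+1] (PySem.Set.ofList [p0]) ↔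
      x ∈ (pvStep nb)^[k] (PySem.Set.ofList [p0]) := by
    by_contra hno
    push_neg at hno
    have hgrow : ∀ k < nb.length,
        ((pvStep nb)^[k] (PySem.Set.ofList [p0])).length <
          ((pvStep nb)^[k+1] (PySem.Set.ofList [p0])).length := by
      intro k hk
      obtain ⟨x, hx⟩ := hno k hk
      have hsub : ∀ q, q ∈ (pvStep nb)^[k] (PySem.Set.ofList [p0]) →
          q ∈ (pvStep nb)^[k+1] (PySem.Set.ofList [p0]) :=
        fun q => pvComp_mono nb p0 k (k+1) (by omega) q
      have hxin : x ∈ (pvStep nb)^[k+1] (PySem.Set.ofList [p0]) ∧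
          x ∉ (pvStep nb)^[k] (PySem.Set.ofList [p0]) := by
        rcases hx with ⟨h1, h2⟩ | ⟨h1, h2⟩
        · exact ⟨h1, h2⟩
        · exact absurd (hsub x h2) h1
      have h1 : ((pvStep nb)^[k] (PySem.Set.ofList [p0])).toFinset.card <
          ((pvStep nb)^[k+1] (PySem.Set.ofList [p0])).toFinset.card := by
        apply Finset.card_lt_card
        rw [Finset.ssubset_iff_of_subset]
        · exact ⟨x, by simpa using hxin.1, by simpa using hxin.2⟩
        · intro a ha; simp only [List.mem_toFinset] at ha ⊢; exact hsub a ha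
      rwa [List.toFinset_card_of_nodup (pvComp_nodup nb p0 k),
        List.toFinset_card_of_nodup (pvComp_nodup nb p0 (k+1))] at h1
    have hge : ∀ k ≤ nb.length, k + 1 ≤ ((pvStep nb)^[k] (PySem.Set.ofList [p0])).length := by
      intro k hk
      induction k with
      | zero =>
        have : p0 ∈ (pvStep nb)^[0] (PySem.Set.ofList [p0]) := by
          simpa using (PySem.Set.mem_ofList [p0] p0).2 (by simp)
        have := List.length_pos_of_mem this
        omega
      | succ m ih2 =>
        have := hgrow m (by omega)
        have := ih2 (by omega)
        omega
    have hbig := hge nb.length (le_refl _)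
    have hsmall : ((pvStep nb)^[nb.length] (PySem.Set.ofList [p0])).length ≤ nb.length := by
      have hsub : ((pvStep nb)^[nb.length] (PySem.Set.ofList [p0])).toFinset ⊆
          (PySem.Set.ofList nb).toFinset := by
        intro a ha
        simp only [List.mem_toFinset] at ha ⊢
        exact (pvComp_sound nb p0 hp0 nb.length a ha).1
      have := Finset.card_le_card hsub
      rw [List.toFinset_card_of_nodup (pvComp_nodup nb p0 nb.length),
        List.toFinset_card_of_nodup (PySem.Set.nodup_ofList nb)] at this
      exact le_trans this (PySem.Set.length_ofList_le nb)
    omega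
  obtain ⟨k, hk, hfx⟩ := hfix
  -- membership is constant from k on
  have hconst : ∀ m, k ≤ m → ∀ x, x ∈ (pvStep nb)^[m] (PySem.Set.ofList [p0]) ↔
      x ∈ (pvStep nb)^[k] (PySem.Set.ofList [p0]) := by
    intro m hm
    induction m with
    | zero => intro x; simp [Nat.le_zero.1 hm]
    | succ j ih2 =>
      rcases Nat.lt_or_ge k (j+1) with h | h
      · intro x
        have hj := ih2 (by omega)
        rw [Function.iterate_succ_apply', pvStep_mem]
        constructor
        · rintro (hx | ⟨hxnb, r, hr, hadj⟩)
          · exact (hj x).1 hx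
          · -- x joins via r ∈ S j = S k; then x ∈ S (k+1) = S k
            have hrk := (hj r).1 hr
            exact (hfx x).1 (by
              rw [Function.iterate_succ_apply', pvStep_mem]
              exact Or.inr ⟨hxnb, r, hrk, hadj⟩)
        · intro hx
          exact Or.inl ((hj x).2 hx)
      · have : k = j + 1 := by omega
        subst this; intro x; rfl
  have hchar : ∀ q, q ∈ (pvStep nb)^[nb.length] (PySem.Set.ofList [p0]) ↔
      q ∈ PySem.Set.ofList nb ∧ pvReach (PySem.Set.ofList nb) p0 q := by
    intro q
    constructor
    · exact fun hq => pvComp_sound nb p0 hp0 nb.length q hq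
    · rintro ⟨hqa, hr⟩
      have hclosed : ∀ a, pvReach (PySem.Set.ofList nb) p0 a →
          a ∈ (pvStep nb)^[k] (PySem.Set.ofList [p0]) := by
        intro a hra
        induction hra with
        | refl =>
          refine pvComp_mono nb p0 0 k (by omega) p0 ?_
          simpa using (PySem.Set.mem_ofList [p0] p0).2 (by simp)
        | @tail b c hab hbc ih2 =>
          have hcnb : c ∈ nb := (PySem.Set.mem_ofList nb c).1 hbc.1
          exact (hfx c).1 (by
            rw [Function.iterate_succ_apply', pvStep_mem]
            exact Or.inr ⟨hcnb, b, ih2, by rw [pvAdjB_symm]; exact hbc.2⟩)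
      exact (hconst nb.length (by omega) q).2 (hclosed q hr)
  exact ⟨hchar, pvComp_nodup nb p0 nb.length⟩

theorem pvIterFold (f : PySem.Set (Int × Int) → PySem.Set (Int × Int))
    (c0 : PySem.Set (Int × Int)) (n : Nat) :
    (List.range n).foldl (fun c _ => f c) c0 = f^[n] c0 := by
  induction n generalizing c0 with
  | zero => simp
  | succ k ih => simp [List.range_succ, Function.iterate_succ_apply', ← ih]

-- the two ports agree on every input
theorem pvMain_eq (mask : List (List Bool)) (x y : Int) :
    preserves_local_connectivity_py mask x y = preserves_local_connectivity_py_alt mask x y := by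
  simp only [preserves_local_connectivity_py, preserves_local_connectivity_py_alt]
  rw [pvGather_eq]
  set height : Int := (mask.length : Int) with hh
  set width : Int := if mask.length = 0 then 0 else ((mask.headD []).length : Int) with hw
  set nb : List (Int × Int) :=
    (PySem.List.pyRange (max 0 (y - 1)) (min height (y + 2)) 1).flatMap
      (fun ny =>
        ((PySem.List.pyRange (max 0 (x - 1)) (min width (x + 2)) 1).filter
            (fun nx => !(nx == x && ny == y) && pvCell mask ny nx)).map
          (fun nx => (nx, ny))) with hnb
  by_cases hlen : nb.length ≤ 1
  · simp [hlen]
  · rw [if_neg hlen, if_neg hlen]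
    have hne : nb ≠ [] := by
      intro h; rw [h] at hlen; simp at hlen
    have hp0 : nb.headD (0, 0) ∈ nb := by
      rcases List.exists_cons_of_ne_nil hne with ⟨a, t, h⟩
      rw [h]; simp
    set p0 : Int × Int := nb.headD (0, 0)
    have hbounds : ∀ q ∈ PySem.Set.ofList nb, 0 ≤ q.1 ∧ q.1 < width ∧ 0 ≤ q.2 ∧ q.2 < height :=
      fun q hq => pvGather_mem mask x y width height q ((PySem.Set.mem_ofList nb q).1 hq)
    have hflood := pvFlood_correct height width (PySem.Set.ofList nb)
      (PySem.Set.nodup_ofList nb) hbounds p0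
      ((PySem.Set.ofList nb).length + 1) [p0] PySem.Set.empty
      List.nodup_nil (by simp [PySem.Set.empty])
      (fun p hp => by
        rw [List.mem_singleton] at hp
        subst hp
        exact ⟨(PySem.Set.mem_ofList nb p0).2 hp0, Relation.ReflTransGen.refl⟩)
      (by simp [PySem.Set.empty])
      (Or.inr (List.mem_singleton_self p0))
      (fun _ => by
        have := List.length_filter_le (fun q => decide (q ∉ (PySem.Set.empty : PySem.Set (Int × Int))))
          (PySem.Set.ofList nb)
        omega)
    have hcomp := pvComp_correct nb p0 hp0
    rw [pvIterFold]
    have hperm : (pvFlood height width (PySem.Set.ofList nb) ((PySem.Set.ofList nb).length + 1)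
        [p0] PySem.Set.empty).Perm ((pvStep nb)^[nb.length] (PySem.Set.ofList [p0])) :=
      (List.perm_ext_iff_of_nodup hflood.2 hcomp.2).2
        (fun q => by rw [hflood.1 q, hcomp.1 q])
    rw [hperm.length_eq]

-- ===== VERDICT (by name: the statement is the Claim_ definition above) =====
theorem preserves_local_connectivity_py_spec : Claim_equal_preserves_local_connectivity_py := by
  intro mask x y _ _
  unfold Spec_preserves_local_connectivity_py
  exact pvMain_eq mask x y
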